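-- pv_equiv track=rewrite | github.com/congyuluo/NameGenie | formatting_helpers.py | balance_source
-- ===== SOURCE A (Python) =====
-- class SubstringBalancingError(Exception):
--     pass
--
-- class BalanceType:
--     UNCLOSED = 0
--     UNINITIATED = 1
--
-- def find_first_unbalanced_closing_brace(s: str) -> int:
--     """Helper function to find the first unbalanced closing brace in a string."""
--     stack = []
--     i = 0
--     while i < len(s):
--         c = s[i]
--         # Check for the start of a Javadoc comment
--         if c == '/' and i + 2 < len(s) and s[i + 1] == '*' and s[i + 2] == '*':
--             # Skip until the end of the Javadoc comment
--             i += 3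
--             while i + 1 < len(s) and not (s[i] == '*' and s[i + 1] == '/'):
--                 i += 1
--             i += 2  # Skip past the '*/'
--             continue
--
--         if c == '{':
--             stack.append(i)
--         elif c == '}':
--             if len(stack) == 0:
--                 return i
--             stack.pop()
--         i += 1
--
--     raise SubstringBalancingError('Unable to find unbalanced closing brace')
--
-- def balance_source(s: str) -> (BalanceType, (int, int), str):
--     """
--     Balances a source string by adding braces.
--     Returns None if the string is already balanced.
--     If unclosed braces: returns the number of added braces.
--     If uninitiated braces: returns the number of removed braces.
--     """
--     stack = []
--     i = 0
--     while i < len(s):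
--         c = s[i]
--
--         # Check for the start of a Javadoc comment
--         if c == '/' and i + 2 < len(s) and s[i + 1] == '*' and s[i + 2] == '*':
--             # Skip until the end of the Javadoc comment
--             i += 3
--             while i + 1 < len(s) and not (s[i] == '*' and s[i + 1] == '/'):
--                 i += 1
--             i += 2  # Skip past the '*/'
--             continue
--
--         if c == '{':
--             if len(stack) > 0 and stack[-1] == '}':
--                 raise SubstringBalancingError('Format Error')
--             stack.append(c)
--         elif c == '}':
--             if len(stack) > 0 and stack[-1] == '{':
--                 stack.pop()
--             else:
--                 stack.append(c)
--
--         i += 1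
--
--     # If the stack is empty, the string is balanced
--     if len(stack) == 0:
--         return None
--     # Determine balance type
--     stack_length = len(stack)
--     # Unclosed string
--     if stack[0] == '{':
--         result_string = s + ''.join(['}' for _ in range(stack_length)])
--         return BalanceType.UNCLOSED, stack_length, result_string
--     # Uninitiated string
--     else:
--         end_position = find_first_unbalanced_closing_brace(s)
--         result_string = s[:end_position]
--         return BalanceType.UNINITIATED, stack_length, result_string
-- ===== SOURCE B (Python) =====
-- class SubstringBalancingError(Exception):
--     pass
--
-- class BalanceType:
--     UNCLOSED = 0
--     UNINITIATED = 1
--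
-- def balance_source(s: str):
--     """Single-pass rewrite: an integer balance counter replaces the character
--     stack, and the index of the first unbalanced closing brace is recorded as
--     it is passed, so the second full scan (the helper) disappears."""
--     balance = 0
--     first_neg = None
--     i = 0
--     n = len(s)
--     while i < n:
--         c = s[i]
--         # Skip Javadoc comments (same boundaries as the original scan)
--         if c == '/' and i + 2 < n and s[i + 1] == '*' and s[i + 2] == '*':
--             i += 3
--             while i + 1 < n and not (s[i] == '*' and s[i + 1] == '/'):
--                 i += 1
--             i += 2
--             continue
--         if c == '{':
--             if balance < 0:
--                 raise SubstringBalancingError('Format Error')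
--             balance += 1
--         elif c == '}':
--             balance -= 1
--             if balance < 0 and first_neg is None:
--                 first_neg = i
--         i += 1
--     if balance == 0:
--         return None
--     if balance > 0:
--         return BalanceType.UNCLOSED, balance, s + '}' * balance
--     return BalanceType.UNINITIATED, -balance, s[:first_neg]
-- ===== Notes on version B (the rewrite author's own statement) =====
-- stated objective: simpler
-- what changed: Replaced the character stack and the second full scan (find_first_unbalanced_closing_brace) by a single pass that keeps an integer balance counter and records the index of the first unbalanced closing brace as it passes it.
import Mathlib
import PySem

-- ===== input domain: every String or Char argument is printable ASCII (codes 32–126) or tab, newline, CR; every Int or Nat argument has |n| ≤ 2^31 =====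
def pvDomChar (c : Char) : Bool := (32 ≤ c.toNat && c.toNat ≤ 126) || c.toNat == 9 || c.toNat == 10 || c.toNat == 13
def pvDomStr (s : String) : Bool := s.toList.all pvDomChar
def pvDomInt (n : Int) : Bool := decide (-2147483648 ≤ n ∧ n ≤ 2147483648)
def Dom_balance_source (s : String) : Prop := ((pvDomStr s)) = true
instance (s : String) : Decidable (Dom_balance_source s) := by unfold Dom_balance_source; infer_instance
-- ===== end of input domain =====

-- B replaces A's character stack and the second full scan (the
-- find_first_unbalanced_closing_brace helper) by one pass with an integer balance
-- counter that records the first unbalanced closing brace as it passes it (objective: simpler).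

-- Shared scanning step, identical in both Pythons: the inner
-- `while i + 1 < len(s) and not (s[i] == '*' and s[i+1] == '/'): i += 1`
-- of the Javadoc skip; returns the index at which that inner loop stops.
def skipWhile (cs : List Char) (i : Nat) : Nat :=
  if i + 1 < cs.length ∧ ¬(cs[i]! = '*' ∧ cs[i+1]! = '/') then skipWhile cs (i+1) else i
termination_by cs.length - i
decreasing_by omega

theorem skipWhile_ge (cs : List Char) (i : Nat) : i ≤ skipWhile cs i := by
  fun_induction skipWhile <;> omega

-- ===== PORT A =====
-- A's main while-loop.  The Python list grows at the tail; here the list HEAD is the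
-- top of the stack (Python stack[-1] = head?, stack[0] = getLast?).  The result `none`
-- models the `raise SubstringBalancingError('Format Error')` (excluded by Pre_).
def loopA (cs : List Char) (i : Nat) (stack : List Char) : Option (List Char) :=
  if i < cs.length then
    if cs[i]! = '/' ∧ i + 2 < cs.length ∧ cs[i+1]! = '*' ∧ cs[i+2]! = '*' then
      loopA cs (skipWhile cs (i+3) + 2) stack
    else if cs[i]! = '{' then
      if stack.head? = some '}' then none
      else loopA cs (i+1) ('{' :: stack)
    else if cs[i]! = '}' then
      if stack.head? = some '{' then loopA cs (i+1) stack.tail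
      else loopA cs (i+1) ('}' :: stack)
    else loopA cs (i+1) stack
  else some stack
termination_by cs.length - i
decreasing_by
  · have := skipWhile_ge cs (i+3); omega
  all_goals omega

-- find_first_unbalanced_closing_brace, step for step (stack of pushed indices);
-- `none` models its `raise SubstringBalancingError('Unable to find ...')`.
def ffubLoop (cs : List Char) (i : Nat) (stack : List Nat) : Option Nat :=
  if i < cs.length then
    if cs[i]! = '/' ∧ i + 2 < cs.length ∧ cs[i+1]! = '*' ∧ cs[i+2]! = '*' then
      ffubLoop cs (skipWhile cs (i+3) + 2) stack
    else if cs[i]! = '{' then ffubLoop cs (i+1) (i :: stack)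
    else if cs[i]! = '}' then
      if stack = [] then some i else ffubLoop cs (i+1) stack.tail
    else ffubLoop cs (i+1) stack
  else none
termination_by cs.length - i
decreasing_by
  · have := skipWhile_ge cs (i+3); omega
  all_goals omega

def balance_source (s : String) : Option (Int × Int × String) :=
  match loopA s.toList 0 [] with
  | none => none  -- Python raises SubstringBalancingError('Format Error') here; excluded by Pre_
  | some stack =>
    if stack = [] then none
    else if stack.getLast? = some '{' then
      some (0, (stack.length : Int), String.ofList (s.toList ++ List.replicate stack.length '}'))
    else
      match ffubLoop s.toList 0 [] with
      | some j => some (1, (stack.length : Int), String.ofList (s.toList.take j))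
      | none => none  -- the helper's raise (unreachable on this branch, see proof)

-- ===== PORT B =====
-- B's single pass: an integer balance plus the recorded index of the first closing
-- brace that makes the balance negative; `none` models B's identical raise.
def loopB (cs : List Char) (i : Nat) (balance : Int) (firstNeg : Option Nat) :
    Option (Int × Option Nat) :=
  if i < cs.length then
    if cs[i]! = '/' ∧ i + 2 < cs.length ∧ cs[i+1]! = '*' ∧ cs[i+2]! = '*' then
      loopB cs (skipWhile cs (i+3) + 2) balance firstNeg
    else if cs[i]! = '{' then
      if balance < 0 then none else loopB cs (i+1) (balance + 1) firstNeg
    else if cs[i]! = '}' then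
      loopB cs (i+1) (balance - 1)
        (if balance - 1 < 0 ∧ firstNeg = none then some i else firstNeg)
    else loopB cs (i+1) balance firstNeg
  else some (balance, firstNeg)
termination_by cs.length - i
decreasing_by
  · have := skipWhile_ge cs (i+3); omega
  all_goals omega

def balance_source_alt (s : String) : Option (Int × Int × String) :=
  match loopB s.toList 0 0 none with
  | none => none  -- B raises the same SubstringBalancingError('Format Error'); excluded by Pre_
  | some (b, fn) =>
    if b = 0 then none
    else if b > 0 then some (0, b, String.ofList (s.toList ++ List.replicate b.toNat '}'))
    else some (1, -b,
      -- s[:first_neg]; Python s[:None] would be the whole string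
      String.ofList (match fn with | some j => s.toList.take j | none => s.toList))

-- ===== PRECONDITION & SPEC =====
-- The brace characters of s lying outside Javadoc comments ('/**' ... '*/', with the
-- boundary conventions of A's skip).  This only selects which input characters count
-- (an input-shape notion: it keeps no stack and computes no balance); the condition
-- itself is the closed-form count inequality below.
mutual
def pvBraces : List Char → List Char
  | '/' :: '*' :: '*' :: r => pvInComment r
  | c :: r => if c = '{' ∨ c = '}' then c :: pvBraces r else pvBraces r
  | [] => []
def pvInComment : List Char → List Char
  | '*' :: '/' :: r => pvBraces r
  | _ :: r => pvInComment r
  | [] => []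
end

-- Pre_ excludes exactly the inputs on which Python A raises
-- SubstringBalancingError('Format Error'): a '{' outside Javadoc comments that is
-- preceded by more '}' than '{' (outside comments).  Python B raises the identical
-- exception there; both Lean ports model the raise as `none`, so the equality proof
-- below happens to hold unconditionally — Pre_ marks where Python A actually returns.
def Pre_balance_source (s : String) : Prop :=
  ∀ p < (pvBraces s.toList).length,
    (pvBraces s.toList)[p]! = '{' →
      ((pvBraces s.toList).take p).count '}' ≤ ((pvBraces s.toList).take p).count '{'
instance (s : String) : Decidable (Pre_balance_source s) := by
  unfold Pre_balance_source; infer_instance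

def pvWitness_balance_source : String := "a{b}"

def Spec_balance_source (s : String) (out : Option (Int × Int × String)) : Prop := out = balance_source_alt s
instance (s : String) (out : Option (Int × Int × String)) : Decidable (Spec_balance_source s out) := by unfold Spec_balance_source; infer_instance

-- ===== CLAIM (what is proved, stated in full; the proofs are below) =====
def Claim_equal_balance_source : Prop := ∀ (s : String), Dom_balance_source s → Pre_balance_source s → Spec_balance_source s (balance_source s)

-- ===== LEMMAS AND PROOFS =====

-- A's stack is always homogeneous; it is abstracted by its signed size:
-- b ≥ 0 means b copies of '{', b < 0 means -b copies of '}'.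
def stackRep (b : Int) : List Char :=
  if 0 ≤ b then List.replicate b.toNat '{' else List.replicate (-b).toNat '}'

theorem stackRep_head_close (b : Int) : (stackRep b).head? = some '}' ↔ b < 0 := by
  unfold stackRep
  split_ifs with h
  · cases hb : b.toNat <;> simp [List.replicate_succ] <;> omega
  · have h2 : (-b).toNat = ((-b).toNat - 1) + 1 := by omega
    rw [h2]; simp [List.replicate_succ]; omega

theorem stackRep_head_open (b : Int) : (stackRep b).head? = some '{' ↔ 0 < b := by
  unfold stackRep
  split_ifs with h
  · cases hb : b.toNat <;> simp [List.replicate_succ] <;> omega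
  · have h2 : (-b).toNat = ((-b).toNat - 1) + 1 := by omega
    rw [h2]; simp [List.replicate_succ]; omega

theorem stackRep_push_open (b : Int) (h : 0 ≤ b) : '{' :: stackRep b = stackRep (b + 1) := by
  unfold stackRep
  rw [if_pos h, if_pos (by omega : (0:Int) ≤ b + 1),
    (by omega : (b + 1).toNat = b.toNat + 1), List.replicate_succ]

theorem stackRep_pop (b : Int) (h : 0 < b) : (stackRep b).tail = stackRep (b - 1) := by
  unfold stackRep
  rw [if_pos (by omega : (0:Int) ≤ b), if_pos (by omega : (0:Int) ≤ b - 1),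
    (by omega : b.toNat = (b - 1).toNat + 1), List.replicate_succ, List.tail_cons]

theorem stackRep_push_close (b : Int) (h : ¬ 0 < b) : '}' :: stackRep b = stackRep (b - 1) := by
  unfold stackRep
  by_cases h0 : (0:Int) ≤ b
  · rw [if_pos h0, (by omega : b.toNat = 0), if_neg (by omega : ¬ (0:Int) ≤ b - 1),
      (by omega : (-(b - 1)).toNat = 1)]
    rfl
  · rw [if_neg h0, if_neg (by omega : ¬ (0:Int) ≤ b - 1),
      (by omega : (-(b - 1)).toNat = (-b).toNat + 1), List.replicate_succ]

-- The two main loops are in lock-step through the abstraction.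
theorem loopA_eq_loopB (cs : List Char) (i : Nat) (b : Int) (fn : Option Nat) :
    loopA cs i (stackRep b) = (loopB cs i b fn).map (fun p => stackRep p.1) := by
  fun_induction loopB cs i b fn with
  | case1 i b fn h1 hj ih =>
      rw [loopA, if_pos h1, if_pos hj]; exact ih
  | case2 i b fn h1 hj hc hneg =>
      rw [loopA, if_pos h1, if_neg hj, if_pos hc,
        if_pos ((stackRep_head_close b).2 hneg)]
      rfl
  | case3 i b fn h1 hj hc hneg ih =>
      rw [loopA, if_pos h1, if_neg hj, if_pos hc,
        if_neg (by rw [stackRep_head_close]; omega : ¬ (stackRep b).head? = some '}'),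
        stackRep_push_open b (by omega)]
      exact ih
  | case4 i b fn h1 hj hc hc2 ih =>
      by_cases hb : 0 < b
      · rw [loopA, if_pos h1, if_neg hj, if_neg hc, if_pos hc2,
          if_pos ((stackRep_head_open b).2 hb), stackRep_pop b hb]
        exact ih
      · rw [loopA, if_pos h1, if_neg hj, if_neg hc, if_pos hc2,
          if_neg (by rw [stackRep_head_open]; omega : ¬ (stackRep b).head? = some '{'),
          stackRep_push_close b hb]
        exact ih
  | case5 i b fn h1 hj hc hc2 ih =>
      rw [loopA, if_pos h1, if_neg hj, if_neg hc, if_neg hc2]; exact ih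
  | case6 i b fn h1 =>
      rw [loopA, if_neg h1]; rfl

-- Once firstNeg is set it never changes.
theorem loopB_fn_persist (cs : List Char) (i : Nat) (b : Int) (fn : Option Nat) (j : Nat) :
    ∀ p : Int × Option Nat, fn = some j → loopB cs i b fn = some p → p.2 = some j := by
  fun_induction loopB cs i b fn with
  | case1 i b fn h1 hj ih =>
      intro p hfn h; exact ih p hfn h
  | case2 i b fn h1 hj hc hneg =>
      intro p hfn h; cases h
  | case3 i b fn h1 hj hc hneg ih =>
      intro p hfn h; exact ih p hfn h
  | case4 i b fn h1 hj hc hc2 ih =>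
      intro p hfn h
      exact ih p (by subst hfn; simp) h
  | case5 i b fn h1 hj hc hc2 ih =>
      intro p hfn h; exact ih p hfn h
  | case6 i b fn h1 =>
      intro p hfn h; cases h; exact hfn

-- If firstNeg was never set, the final balance is still nonnegative.
theorem loopB_nonneg_of_fn_none (cs : List Char) (i : Nat) (b : Int) (fn : Option Nat) :
    ∀ p : Int × Option Nat, 0 ≤ b → loopB cs i b fn = some p → p.2 = none → 0 ≤ p.1 := by
  fun_induction loopB cs i b fn with
  | case1 i b fn h1 hj ih =>
      intro p hb h hfn; exact ih p hb h hfn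
  | case2 i b fn h1 hj hc hneg =>
      intro p hb h hfn; omega
  | case3 i b fn h1 hj hc hneg ih =>
      intro p hb h hfn
      exact ih p (by omega) h hfn
  | case4 i b fn h1 hj hc hc2 ih =>
      intro p hb h hfn
      cases hfn2 : (if b - 1 < 0 ∧ fn = none then (some i : Option Nat) else fn) with
      | some j =>
          rw [hfn2] at h
          have := loopB_fn_persist cs (i+1) (b-1) (some j) j p rfl h
          rw [this] at hfn; cases hfn
      | none =>
          have hge : (0:Int) ≤ b - 1 := by
            by_cases hcond : b - 1 < 0 ∧ fn = none
            · rw [if_pos hcond] at hfn2; cases hfn2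
            · rw [if_neg hcond] at hfn2; subst hfn2
              simp only [and_true] at hcond; omega
          exact ih p hge h hfn
  | case5 i b fn h1 hj hc hc2 ih =>
      intro p hb h hfn
      exact ih p hb h hfn
  | case6 i b fn h1 =>
      intro p hb h hfn; cases h; exact hb

-- The helper's result is exactly the firstNeg index that B records in its single pass.
theorem ffub_eq_fn (cs : List Char) (i : Nat) (st : List Nat) (p : Int × Option Nat)
    (h : loopB cs i (st.length : Int) none = some p) : ffubLoop cs i st = p.2 := by
  fun_induction ffubLoop cs i st generalizing p with
  | case1 i st h1 hj ih =>
      rw [loopB, if_pos h1, if_pos hj] at h; exact ih p h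
  | case2 i st h1 hj hc ih =>
      rw [loopB, if_pos h1, if_neg hj, if_pos hc,
        if_neg (by omega : ¬ ((st.length : Int) < 0))] at h
      have hlen : ((i :: st).length : Int) = (st.length : Int) + 1 := by
        simp [List.length_cons]
      rw [← hlen] at h
      exact ih p h
  | case3 i h1 hj hc hc2 =>
      simp only [List.length_nil, Int.natCast_zero] at h
      rw [loopB, if_pos h1, if_neg hj, if_neg hc, if_pos hc2,
        if_pos (⟨by omega, rfl⟩ : (0:Int) - 1 < 0 ∧ (none : Option Nat) = none)] at h
      exact (loopB_fn_persist cs (i+1) (0-1) (some i) i p rfl h).symm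
  | case4 i st h1 hj hc hc2 hne ih =>
      rw [loopB, if_pos h1, if_neg hj, if_neg hc, if_pos hc2] at h
      have hlen1 : 1 ≤ st.length := by
        cases st with | nil => exact absurd rfl hne | cons a t => simp
      rw [if_neg (fun hcon => absurd hcon.1 (by omega))] at h
      have hlen : (st.tail.length : Int) = (st.length : Int) - 1 := by
        cases st with
        | nil => exact absurd rfl hne
        | cons a t => simp only [List.tail_cons, List.length_cons]; push_cast; ring
      rw [← hlen] at h
      exact ih p h
  | case5 i st h1 hj hc hc2 ih =>
      rw [loopB, if_pos h1, if_neg hj, if_neg hc, if_neg hc2] at h; exact ih p h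
  | case6 i st h1 =>
      rw [loopB, if_neg h1] at h; cases h; rfl

theorem stackRep_getLast (b : Int) (hb : b ≠ 0) :
    (stackRep b).getLast? = some (if 0 < b then '{' else '}') := by
  unfold stackRep
  by_cases h : (0:Int) ≤ b
  · have h1 : 0 < b := by omega
    have h2 : b.toNat ≠ 0 := by omega
    simp [h, h1, List.getLast?_replicate, h2]
  · have h1 : ¬ 0 < b := by omega
    have h2 : (-b).toNat ≠ 0 := by omega
    simp [h, h1, List.getLast?_replicate, h2]

-- ===== VERDICT (by name: the statement is the Claim_ definition above) =====
theorem balance_source_spec : Claim_equal_balance_source := by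
  intro s _ _
  unfold Spec_balance_source balance_source balance_source_alt
  have key := loopA_eq_loopB s.toList 0 0 none
  have h0 : stackRep 0 = [] := by simp [stackRep]
  rw [h0] at key
  cases hB : loopB s.toList 0 0 none with
  | none => rw [hB] at key; simp only [Option.map_none] at key; rw [key]
  | some p =>
    obtain ⟨b, fn⟩ := p
    rw [hB] at key; simp only [Option.map_some] at key
    rw [key]
    dsimp only
    by_cases hb0 : b = 0
    · subst hb0; simp [stackRep]
    · have hne : stackRep b ≠ [] := by
        unfold stackRep; split_ifs with h <;> simp <;> omega
      rw [if_neg hne, if_neg hb0]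
      by_cases hbpos : 0 < b
      · rw [stackRep_getLast b hb0, if_pos hbpos, if_pos rfl, if_pos (by omega : b > 0)]
        have hlenN : (stackRep b).length = b.toNat := by
          unfold stackRep; rw [if_pos (by omega : (0:Int) ≤ b)]; simp
        rw [hlenN]
        have : (b.toNat : Int) = b := by omega
        rw [this]
      · -- b < 0 : the uninitiated branch
        rw [stackRep_getLast b hb0, if_neg hbpos,
          if_neg (by simp : ¬ (some '}' = some '{')), if_neg (by omega : ¬ b > 0)]
        have hfnsome : ∃ j, fn = some j := by
          cases hfn : fn with
          | some j => exact ⟨j, rfl⟩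
          | none =>
            have := loopB_nonneg_of_fn_none s.toList 0 0 none (b, fn)
              (by omega) hB (by rw [hfn])
            simp only at this; omega
        obtain ⟨j, hj⟩ := hfnsome
        have hffub : ffubLoop s.toList 0 [] = some j := by
          have := ffub_eq_fn s.toList 0 [] (b, fn) (by simpa using hB)
          rw [this, hj]
        rw [hffub, hj]
        have hlen : ((stackRep b).length : Int) = -b := by
          unfold stackRep; rw [if_neg (by omega : ¬ (0:Int) ≤ b)]; simp; omega
        rw [hlen]
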